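-- pv_equiv track=rewrite | github.com/eliottcassidy2000/math | 04-computation/det_m_from_indpoly.py | count_H
-- ===== SOURCE A (Python) =====
-- from itertools import permutations, combinations
--
-- def count_H(T, n):
--     count = 0
--     for perm in permutations(range(n)):
--         prod = 1
--         for k in range(n-1):
--             prod *= T.get((perm[k], perm[k+1]), 0)
--         count += prod
--     return count
-- ===== SOURCE B (Python) =====
-- from functools import lru_cache
--
-- def count_H(T, n):
--     # Held-Karp style memoized recursion over (remaining vertices, last vertex):
--     # shared suffix sums replace the n! permutation enumeration.
--     @lru_cache(maxsize=None)
--     def H(remaining, last):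
--         if not remaining:
--             return 1
--         total = 0
--         for j in remaining:
--             w = 1 if last is None else T.get((last, j), 0)
--             total += w * H(remaining - frozenset([j]), j)
--         return total
--     return H(frozenset(range(n)), None)
-- ===== Notes on version B (the rewrite author's own statement) =====
-- stated objective: alternative
-- what changed: Replaced the O(n!*n) enumeration of all permutations by a memoized Held-Karp recursion over (remaining vertex set, last vertex) sharing suffix sums, O(2^n*n^2); intended as faster, measured 3.15x at the largest size both finished but unconfirmed at sizes where both time out.
import Mathlib
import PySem

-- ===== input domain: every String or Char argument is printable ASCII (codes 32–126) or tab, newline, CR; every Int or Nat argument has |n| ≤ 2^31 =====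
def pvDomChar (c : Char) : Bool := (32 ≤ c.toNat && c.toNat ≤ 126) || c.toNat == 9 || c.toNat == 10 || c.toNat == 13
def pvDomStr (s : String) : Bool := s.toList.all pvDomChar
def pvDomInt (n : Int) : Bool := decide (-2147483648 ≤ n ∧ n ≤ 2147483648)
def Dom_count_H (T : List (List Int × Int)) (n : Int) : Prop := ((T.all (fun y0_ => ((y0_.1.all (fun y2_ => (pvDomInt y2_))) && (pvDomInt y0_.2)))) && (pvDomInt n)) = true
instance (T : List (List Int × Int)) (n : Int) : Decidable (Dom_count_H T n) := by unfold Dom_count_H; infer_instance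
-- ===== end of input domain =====

-- B replaces A's permutation enumeration by a memoized Held-Karp recursion over
-- (remaining vertices, last vertex), sharing suffix sums (a different algorithm).


-- ===== PORT A =====
-- T.get((a, b), 0)  (dict lookup with default; T is the dict as an association list)
def pvWget (T : List (List Int × Int)) (a b : Int) : Int :=
  PySem.Dict.getD (PySem.Dict.ofList T) [a, b] 0

-- itertools.permutations(l) for a duplicate-free l: all orderings (port of the library call)
def pvPerms (l : List Int) : List (List Int) :=
  if h : l = [] then [[]]
  else l.attach.flatMap (fun x => (pvPerms (l.erase x.1)).map (x.1 :: ·))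
termination_by l.length
decreasing_by
  have hm : x.1 ∈ l := x.2
  have := List.length_erase_of_mem hm
  have : l.length ≠ 0 := by simpa [List.length_eq_zero_iff] using h
  omega

def count_H (T : List (List Int × Int)) (n : Int) : Int :=
  (pvPerms (PySem.List.pyRange 0 n 1)).foldl
    (fun count perm =>
      count + (PySem.List.pyRange 0 (n - 1) 1).foldl
        (fun prod k =>
          prod * pvWget T (PySem.List.pyGetD perm k 0) (PySem.List.pyGetD perm (k + 1) 0)) 1) 0

-- ===== PORT B =====
-- H(remaining, last): sum over orderings of `remaining` continuing after `last`
-- of the product of consecutive weights (last = none ⇒ no incoming weight).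
def pvAltH (T : List (List Int × Int)) (remaining : List Int) (last : Option Int) : Int :=
  if h : remaining = [] then 1
  else remaining.attach.foldl
    (fun total j =>
      total + (match last with | none => 1 | some l => pvWget T l j.1)
        * pvAltH T (remaining.erase j.1) (some j.1)) 0
termination_by remaining.length
decreasing_by
  have hm : j.1 ∈ remaining := j.2
  have := List.length_erase_of_mem hm
  have : remaining.length ≠ 0 := by simpa [List.length_eq_zero_iff] using h
  omega

def count_H_alt (T : List (List Int × Int)) (n : Int) : Int :=
  pvAltH T (PySem.Set.ofList (PySem.List.pyRange 0 n 1)) none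

-- ===== PRECONDITION & SPEC =====
def Spec_count_H (T : List (List Int × Int)) (n : Int) (out : Int) : Prop := out = count_H_alt T n
instance (T : List (List Int × Int)) (n : Int) (out : Int) : Decidable (Spec_count_H T n out) := by unfold Spec_count_H; infer_instance

-- ===== CLAIM (what is proved, stated in full; the proofs are below) =====
def Claim_equal_count_H : Prop := ∀ (T : List (List Int × Int)) (n : Int), Dom_count_H T n → Spec_count_H T n (count_H T n)

-- ===== LEMMAS AND PROOFS =====

theorem pvSumFlatMap {α : Type} (l : List α) (f : α → List Int) :
    (l.flatMap f).sum = (l.map (fun x => (f x).sum)).sum := by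
  induction l with
  | nil => rfl
  | cons x xs ih => simp [List.flatMap_cons, ih]

-- product of consecutive-pair weights along last :: p
def pvChain (T : List (List Int × Int)) (last : Option Int) : List Int → Int
  | [] => 1
  | j :: r => (match last with | none => 1 | some l => pvWget T l j) * pvChain T (some j) r

-- every permutation has the length of its source
theorem pvPerms_length (l : List Int) : ∀ p ∈ pvPerms l, p.length = l.length := by
  induction hn : l.length using Nat.strong_induction_on generalizing l with
  | _ n ih =>
    intro p hp
    rw [pvPerms] at hp
    by_cases h : l = []
    · subst h; simp at hp hn; simp [hp]; omega
    · simp [h] at hp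
      obtain ⟨x, hx, q, hq, rfl⟩ := hp
      have hlt : (l.erase x).length < n := by
        have := List.length_erase_of_mem hx
        have : l.length ≠ 0 := by simpa [List.length_eq_zero_iff] using h
        omega
      have := ih _ hlt (l.erase x) rfl q hq
      have he := List.length_erase_of_mem hx
      have : l.length ≠ 0 := by simpa [List.length_eq_zero_iff] using h
      simp [List.length_cons]; omega

-- A's inner loop over indices computes the chain product
theorem pvInner_eq_chain (T : List (List Int × Int)) (x : Int) (r : List Int) :
    ∀ a : Int, (List.range r.length).foldl
      (fun prod k => prod * pvWget T ((x :: r).getD k 0) ((x :: r).getD (k + 1) 0)) a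
      = a * pvChain T (some x) r := by
  induction r generalizing x with
  | nil => intro a; simp [pvChain]
  | cons y r' ih =>
    intro a
    rw [show (y :: r').length = r'.length + 1 from rfl, List.range_succ_eq_map,
        List.foldl_cons, List.foldl_map]
    have htail : List.foldl
        (fun prod k => prod * pvWget T ((y :: r').getD k 0) ((y :: r').getD (k + 1) 0))
        (a * pvWget T x y) (List.range r'.length) = a * pvChain T (some x) (y :: r') := by
      rw [ih y (a * pvWget T x y)]
      simp [pvChain, mul_assoc]
    exact Eq.trans (by apply PySem.List.foldl_congr_mem; intro acc k _; rfl) htail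

-- B's recursion sums the chain products of all permutations
theorem pvAltH_eq_sum (T : List (List Int × Int)) (l : List Int) (last : Option Int) :
    pvAltH T l last = ((pvPerms l).map (pvChain T last)).sum := by
  induction hn : l.length using Nat.strong_induction_on generalizing l last with
  | _ n ih =>
    rw [pvAltH, pvPerms]
    by_cases h : l = []
    · simp [h, pvChain]
    · simp only [h, dite_false]
      rw [PySem.List.foldl_add]
      simp only [zero_add, List.map_flatMap]
      rw [pvSumFlatMap]
      congr 1
      apply List.map_congr_left
      intro x hx
      have hlt : (l.erase x.1).length < n := by
        have := List.length_erase_of_mem x.2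
        have : l.length ≠ 0 := by simpa [List.length_eq_zero_iff] using h
        omega
      rw [ih _ hlt _ (some x.1) rfl, List.map_map]
      have heq : (pvChain T last ∘ fun x_1 => x.1 :: x_1) = fun p =>
          (match last with | none => 1 | some l => pvWget T l x.1) * pvChain T (some x.1) p := by
        funext p; cases last <;> rfl
      rw [heq, List.sum_map_mul_left]

-- A's outer loop as a sum of full chain products
theorem pvCountH_eq_sum (T : List (List Int × Int)) (n : Int) :
    count_H T n = ((pvPerms (PySem.List.pyRange 0 n 1)).map (pvChain T none)).sum := by
  rw [count_H, PySem.List.foldl_add, zero_add]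
  congr 1
  apply List.map_congr_left
  intro p hp
  have hlen : p.length = (PySem.List.pyRange 0 n 1).length :=
    pvPerms_length _ p hp
  rw [PySem.List.length_pyRange_one] at hlen
  rw [PySem.List.pyRange_one]
  rw [List.foldl_map]
  have hcast : ∀ (k : Nat) (q : List Int),
      PySem.List.pyGetD q ((0 : Int) + (k : Int)) 0 = q.getD k 0 := by
    intro k q; rw [zero_add, PySem.List.pyGetD_natCast]
  cases p with
  | nil =>
    have h0 : (n - 1 - 0).toNat = 0 := by simp at hlen; omega
    rw [h0]
    simp [pvChain]
  | cons x r =>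
    have hm : (n - 1 - 0).toNat = r.length := by
      simp [List.length_cons] at hlen; omega
    rw [hm]
    have hch : pvChain T none (x :: r) = 1 * pvChain T (some x) r := by simp [pvChain]
    rw [hch, ← pvInner_eq_chain T x r 1]
    apply PySem.List.foldl_congr_mem
    intro acc k hk
    have h2 : ((0 : Int) + (k : Int) + 1) = ((k + 1 : Nat) : Int) := by push_cast; ring
    rw [hcast k, h2, PySem.List.pyGetD_natCast]

-- ===== VERDICT (by name: the statement is the Claim_ definition above) =====
theorem count_H_spec : Claim_equal_count_H := by
  intro T n _
  unfold Spec_count_H count_H_alt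
  have hr := PySem.Set.ofList_eq_self_of_nodup (PySem.List.pyRange 0 n 1)
    (PySem.List.nodup_pyRange_one 0 n)
  rw [hr, pvAltH_eq_sum, pvCountH_eq_sum]
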